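-- pv_equiv track=rewrite | github.com/BlankSpruce/gersemi | gersemi/command_invocation_dumpers/preserving_command_invocation_dumper.py | find_line_comment_begin
-- ===== SOURCE A (Python) =====
-- LINE_COMMENT_BEGIN = "#"
--
-- BRACKET_COMMENT_BEGIN = "#["
--
-- def find_line_comment_begin(s):
--     start = 0
--     while True:
--         index = s.rfind(LINE_COMMENT_BEGIN, start)
--         if index == -1:
--             return index
--
--         if index == s.rfind(BRACKET_COMMENT_BEGIN, start):
--             start = index + 1
--         else:
--             return index
-- ===== SOURCE B (Python) =====
-- # B: no loop — take the last '#' once and check directly whether it begins a bracket comment.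
-- def find_line_comment_begin(s):
--     index = s.rfind("#")
--     if index == -1 or s[index:index + 2] == "#[":
--         return -1
--     return index
-- ===== Notes on version B (the rewrite author's own statement) =====
-- stated objective: simpler
-- what changed: Replaced A's while-True loop that repeatedly shrinks the search window with rfind('#') and rfind('#[') by a single rfind('#') followed by a direct two-character slice comparison s[idx:idx+2] == '#['.
import Mathlib
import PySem

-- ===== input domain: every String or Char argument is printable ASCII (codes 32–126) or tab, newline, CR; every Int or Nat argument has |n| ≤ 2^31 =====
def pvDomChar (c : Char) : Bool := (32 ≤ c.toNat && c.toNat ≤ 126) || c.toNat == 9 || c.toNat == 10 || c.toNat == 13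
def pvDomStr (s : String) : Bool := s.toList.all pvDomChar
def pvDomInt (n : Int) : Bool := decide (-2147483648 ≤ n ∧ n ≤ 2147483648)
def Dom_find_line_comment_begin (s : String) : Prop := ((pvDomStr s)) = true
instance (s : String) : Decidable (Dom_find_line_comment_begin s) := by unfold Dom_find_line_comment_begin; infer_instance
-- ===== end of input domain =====

-- B replaces A's shrinking-window while-loop (repeated rfind calls) by a single rfind plus a
-- direct two-character slice check; objective: simpler.

-- ===== PORT A =====
-- LINE_COMMENT_BEGIN = "#" ; BRACKET_COMMENT_BEGIN = "#[" ; the while-True loop, step for step.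
-- The fuel argument is a totality guard only: the supplied fuel s.toList.length + 2 always suffices
-- (each iteration strictly increases start, and past the end rfind returns -1).
def find_line_comment_begin_loop (s : String) (start : Int) : Nat → Int
  | 0 => -1
  | fuel + 1 =>
    let index := PySem.Str.rfindFrom s "#" start
    if index = -1 then index
    else if index = PySem.Str.rfindFrom s "#[" start then
      find_line_comment_begin_loop s (index + 1) fuel
    else index

def find_line_comment_begin (s : String) : Int :=
  find_line_comment_begin_loop s 0 (s.toList.length + 2)

-- ===== PORT B =====
def find_line_comment_begin_alt (s : String) : Int :=
  let index := PySem.Str.rfind s "#"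
  if index = -1 ∨ PySem.Str.slice s (some index) (some (index + 2)) = "#[" then -1
  else index

-- ===== PRECONDITION & SPEC =====
def Spec_find_line_comment_begin (s : String) (out : Int) : Prop := out = find_line_comment_begin_alt s
instance (s : String) (out : Int) : Decidable (Spec_find_line_comment_begin s out) := by unfold Spec_find_line_comment_begin; infer_instance

-- ===== CLAIM (what is proved, stated in full; the proofs are below) =====
def Claim_equal_find_line_comment_begin : Prop := ∀ (s : String), Dom_find_line_comment_begin s → Spec_find_line_comment_begin s (find_line_comment_begin s)

-- ===== LEMMAS AND PROOFS =====

theorem pv_loop_step (s : String) (start : Int) (fuel : Nat) :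
    find_line_comment_begin_loop s start (fuel + 1) =
      (let index := PySem.Str.rfindFrom s "#" start
       if index = -1 then index
       else if index = PySem.Str.rfindFrom s "#[" start then
         find_line_comment_begin_loop s (index + 1) fuel
       else index) := rfl

theorem pv_go_zero (s sub : List Char) :
    PySem.Chars.rfind.go s sub 0 = if sub.isPrefixOf s then 0 else -1 := by
  simp [PySem.Chars.rfind.go]

theorem pv_go_succ (s sub : List Char) (j : Nat) :
    PySem.Chars.rfind.go s sub (j+1) =
      if sub.isPrefixOf (s.drop (j+1)) then ((j : Int)+1) else PySem.Chars.rfind.go s sub j := by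
  simp [PySem.Chars.rfind.go]

theorem pv_neg_one_le_go (s sub : List Char) (n : Nat) :
    (-1 : Int) ≤ PySem.Chars.rfind.go s sub n := by
  induction n with
  | zero => rw [pv_go_zero]; split <;> omega
  | succ j ih => rw [pv_go_succ]; split <;> omega

theorem pv_go_le (s sub : List Char) (n : Nat) : PySem.Chars.rfind.go s sub n ≤ n := by
  induction n with
  | zero => rw [pv_go_zero]; split <;> omega
  | succ j ih => rw [pv_go_succ]; split <;> omega

theorem pv_neg_one_le_rfind (s sub : List Char) : (-1 : Int) ≤ PySem.Chars.rfind s sub := by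
  unfold PySem.Chars.rfind; exact pv_neg_one_le_go s sub s.length

theorem pv_rfind_le (s sub : List Char) : PySem.Chars.rfind s sub ≤ s.length := by
  unfold PySem.Chars.rfind; exact pv_go_le s sub s.length

theorem pv_rfindFrom_expand (s sub : List Char) (start : Int) :
    PySem.Chars.rfindFrom s sub start none =
      (let st : Int := if start < 0 then (if start + s.length < 0 then 0 else start + s.length) else start
       if (s.length : Int) < st then -1
       else if PySem.Chars.rfind (List.drop st.toNat (List.take (s.length : Int).toNat s)) sub = -1 then -1
       else st + PySem.Chars.rfind (List.drop st.toNat (List.take (s.length : Int).toNat s)) sub) := rfl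

theorem pv_go_eq_neg_one_iff (s sub : List Char) (n : Nat) :
    PySem.Chars.rfind.go s sub n = -1 ↔ ∀ j ≤ n, ¬ sub.isPrefixOf (s.drop j) = true := by
  induction n with
  | zero =>
    rw [pv_go_zero]
    constructor
    · intro h j hj
      interval_cases j
      simp only [List.drop_zero]
      split at h
      · simp at h
      · assumption
    · intro h
      split
      · exact absurd (by assumption) (by simpa using h 0 le_rfl)
      · rfl
  | succ j ih =>
    rw [pv_go_succ]
    constructor
    · intro h k hk
      split at h
      · exact absurd h (by omega)
      · rename_i hnp
        by_cases hkj : k ≤ j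
        · exact ih.mp h k hkj
        · have : k = j + 1 := by omega
          subst this; exact hnp
    · intro h
      split
      · exact absurd (by assumption) (h (j+1) le_rfl)
      · exact ih.mpr (fun k hk => h k (by omega))

theorem pv_go_prefix (s sub : List Char) (n : Nat) (h : PySem.Chars.rfind.go s sub n ≠ -1) :
    sub.isPrefixOf (s.drop (PySem.Chars.rfind.go s sub n).toNat) = true := by
  induction n with
  | zero =>
    rw [pv_go_zero] at h ⊢
    split at h
    · rename_i hp; simp [hp]
    · exact absurd rfl h
  | succ j ih =>
    rw [pv_go_succ] at h ⊢
    by_cases hp : sub.isPrefixOf (s.drop (j+1)) = true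
    · simp [hp]
    · simp only [hp] at h ⊢
      exact ih h

theorem pv_go_max (s sub : List Char) (n : Nat) (k : Nat) (hk : k ≤ n)
    (hlt : PySem.Chars.rfind.go s sub n < (k : Int)) :
    ¬ sub.isPrefixOf (s.drop k) = true := by
  induction n with
  | zero =>
    interval_cases k
    rw [pv_go_zero] at hlt
    split at hlt
    · omega
    · simpa using (by assumption : ¬ sub.isPrefixOf s = true)
  | succ j ih =>
    rw [pv_go_succ] at hlt
    split at hlt
    · omega
    · rename_i hnp
      by_cases hkj : k ≤ j
      · exact ih hkj hlt
      · have : k = j + 1 := by omega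
        subst this; exact hnp

theorem pv_rfind_eq_neg_one_iff (s sub : List Char) :
    PySem.Chars.rfind s sub = -1 ↔ ∀ j ≤ s.length, ¬ sub.isPrefixOf (s.drop j) = true := by
  unfold PySem.Chars.rfind; exact pv_go_eq_neg_one_iff s sub s.length

theorem pv_rfind_prefix (s sub : List Char) (h : PySem.Chars.rfind s sub ≠ -1) :
    sub.isPrefixOf (s.drop (PySem.Chars.rfind s sub).toNat) = true := by
  unfold PySem.Chars.rfind at *; exact pv_go_prefix s sub s.length h

theorem pv_rfind_max (s sub : List Char) (k : Nat) (hk : k ≤ s.length)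
    (hlt : PySem.Chars.rfind s sub < (k : Int)) :
    ¬ sub.isPrefixOf (s.drop k) = true := by
  unfold PySem.Chars.rfind at *; exact pv_go_max s sub s.length k hk hlt

theorem pv_rfindFrom_zero (s sub : List Char) :
    PySem.Chars.rfindFrom s sub 0 none = PySem.Chars.rfind s sub := by
  rw [pv_rfindFrom_expand]
  norm_num
  split_ifs with h1 h2 <;> omega

theorem pv_slice_expand {α : Type} (xs : List α) (a b : Int) :
    PySem.List.slice xs (some a) (some b) =
      List.take (PySem.List.clampIdx xs.length b - PySem.List.clampIdx xs.length a)
        (List.drop (PySem.List.clampIdx xs.length a) xs) := rfl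

-- the two-character slice equals "#[" iff "#[" is a prefix of the tail at idx
theorem pv_slice_eq_iff (L : List Char) (i : Int) (h0 : 0 ≤ i) (hle : i ≤ L.length) :
    PySem.List.slice L (some i) (some (i + 2)) = ['#', '['] ↔
      ['#', '['].isPrefixOf (L.drop i.toNat) = true := by
  rw [pv_slice_expand]
  have ha : PySem.List.clampIdx L.length i = i.toNat := by
    unfold PySem.List.clampIdx; split_ifs <;> omega
  have hb : PySem.List.clampIdx L.length (i + 2) = min (i.toNat + 2) L.length := by
    unfold PySem.List.clampIdx; split_ifs <;> omega
  rw [ha, hb]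
  have harith : min (i.toNat + 2) L.length - i.toNat = min 2 (L.length - i.toNat) := by omega
  rw [harith]
  have hX : (L.drop i.toNat).length = L.length - i.toNat := by simp
  rw [List.isPrefixOf_iff_prefix, List.prefix_iff_eq_take]
  have : List.take (min 2 (L.length - i.toNat)) (List.drop i.toNat L)
      = List.take 2 (List.drop i.toNat L) := by
    rw [← hX, ← List.take_take, List.take_length]
  rw [this]
  constructor
  · intro h; exact h.symm
  · intro h; exact h.symm

theorem pv_rfind_bracket (L : List Char)
    (hne : PySem.Chars.rfind L ['#'] ≠ -1)
    (hb : ['#','['].isPrefixOf (L.drop (PySem.Chars.rfind L ['#']).toNat) = true) :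
    PySem.Chars.rfind L ['#','['] = PySem.Chars.rfind L ['#'] := by
  have h0 : 0 ≤ PySem.Chars.rfind L ['#'] := by
    have := pv_neg_one_le_rfind L ['#']; omega
  have hle : PySem.Chars.rfind L ['#'] ≤ L.length := pv_rfind_le L ['#']
  have hjne : PySem.Chars.rfind L ['#','['] ≠ -1 := by
    intro hj
    exact (pv_rfind_eq_neg_one_iff L ['#','[']).mp hj (PySem.Chars.rfind L ['#']).toNat
      (by omega) hb
  have hj0 : 0 ≤ PySem.Chars.rfind L ['#','['] := by
    have := pv_neg_one_le_rfind L ['#','[']; omega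
  have hjle : PySem.Chars.rfind L ['#','['] ≤ L.length := pv_rfind_le L ['#','[']
  -- i ≤ j : maximality of rfind "#["
  have hij : PySem.Chars.rfind L ['#'] ≤ PySem.Chars.rfind L ['#','['] := by
    by_contra hlt
    exact pv_rfind_max L ['#','['] (PySem.Chars.rfind L ['#']).toNat (by omega) (by omega) hb
  -- j ≤ i : maximality of rfind "#" plus '#' prefix of "#["
  have hji : PySem.Chars.rfind L ['#','['] ≤ PySem.Chars.rfind L ['#'] := by
    by_contra hlt
    have hpb := pv_rfind_prefix L ['#','['] hjne
    have hp1 : ['#'].isPrefixOf (L.drop (PySem.Chars.rfind L ['#','[']).toNat) = true := by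
      rw [List.isPrefixOf_iff_prefix] at hpb ⊢
      exact List.IsPrefix.trans (by simp) hpb
    exact pv_rfind_max L ['#'] (PySem.Chars.rfind L ['#','[']).toNat (by omega) (by omega) hp1
  omega

theorem pv_after_last (L : List Char) (i : Int) (h0 : 0 ≤ i) (hle : i + 1 ≤ L.length)
    (hmax : ∀ k ≤ L.length, i < (k : Int) → ¬ ['#'].isPrefixOf (L.drop k) = true) :
    PySem.Chars.rfindFrom L ['#'] (i + 1) none = -1 := by
  rw [pv_rfindFrom_expand]
  simp only [Int.toNat_natCast, List.take_length]
  rw [if_neg (by omega : ¬ (i + 1) < 0), if_neg (by omega : ¬ ((L.length : Int) < i + 1))]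
  have hr : PySem.Chars.rfind (List.drop (i + 1).toNat L) ['#'] = -1 := by
    rw [pv_rfind_eq_neg_one_iff]
    intro j hj hp
    rw [List.drop_drop] at hp
    rw [List.length_drop] at hj
    exact hmax ((i + 1).toNat + j) (by omega) (by omega) hp
  rw [if_pos hr]

-- ===== VERDICT (by name: the statement is the Claim_ definition above) =====
theorem find_line_comment_begin_spec : Claim_equal_find_line_comment_begin := by
  unfold Claim_equal_find_line_comment_begin
  intro s _
  unfold Spec_find_line_comment_begin find_line_comment_begin find_line_comment_begin_alt
  have hs1 : "#".toList = ['#'] := by decide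
  have hs2 : "#[".toList = ['#','['] := by decide
  rw [show s.toList.length + 2 = (s.toList.length + 1) + 1 from rfl, pv_loop_step]
  simp only [PySem.Str.rfindFrom_eq, PySem.Str.rfind_eq, hs1, hs2, pv_rfindFrom_zero]
  by_cases hidx : PySem.Chars.rfind s.toList ['#'] = -1
  · simp [hidx]
  · have h0 : 0 ≤ PySem.Chars.rfind s.toList ['#'] := by
      have := pv_neg_one_le_rfind s.toList ['#']; omega
    have hle : PySem.Chars.rfind s.toList ['#'] ≤ s.toList.length := pv_rfind_le s.toList ['#']
    have hslice : (PySem.Str.slice s (some (PySem.Chars.rfind s.toList ['#']))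
          (some (PySem.Chars.rfind s.toList ['#'] + 2)) = "#[") ↔
        ['#','['].isPrefixOf (s.toList.drop (PySem.Chars.rfind s.toList ['#']).toNat) = true := by
      rw [← String.toList_inj, PySem.Str.toList_slice, PySem.Chars.slice_eq_listSlice, hs2]
      exact pv_slice_eq_iff s.toList _ h0 hle
    by_cases hb : ['#','['].isPrefixOf (s.toList.drop (PySem.Chars.rfind s.toList ['#']).toNat) = true
    · -- the last '#' begins a bracket comment: both return -1
      have heq := pv_rfind_bracket s.toList hidx hb
      have hplen : (PySem.Chars.rfind s.toList ['#']) + 2 ≤ s.toList.length := by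
        have hbp := List.isPrefixOf_iff_prefix.mp hb
        have hlen2 := hbp.length_le
        rw [List.length_drop] at hlen2
        simp only [List.length_cons, List.length_nil] at hlen2
        omega
      have h4 : PySem.Chars.rfindFrom s.toList ['#'] (PySem.Chars.rfind s.toList ['#'] + 1) none = -1 := by
        apply pv_after_last s.toList _ h0 (by omega)
        intro k hk hklt
        exact pv_rfind_max s.toList ['#'] k hk hklt
      rw [if_neg hidx, if_pos heq.symm, pv_loop_step]
      simp only [PySem.Str.rfindFrom_eq, hs1]
      rw [h4]
      simp [hidx, hslice.mpr hb]
    · -- the last '#' stands alone: both return its index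
      have hne : PySem.Chars.rfind s.toList ['#','['] ≠ PySem.Chars.rfind s.toList ['#'] := by
        intro heq
        apply hb
        rw [← heq] at hb ⊢
        have : PySem.Chars.rfind s.toList ['#','['] ≠ -1 := by omega
        exact pv_rfind_prefix s.toList ['#','['] this
      rw [if_neg hidx, if_neg (fun h => hne h.symm)]
      have : ¬ (PySem.Chars.rfind s.toList ['#'] = -1 ∨ PySem.Str.slice s
          (some (PySem.Chars.rfind s.toList ['#'])) (some (PySem.Chars.rfind s.toList ['#'] + 2)) = "#[") := by
        intro h
        rcases h with h | h
        · exact hidx h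
        · exact hb (hslice.mp h)
      simp [this]
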